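-- pv_equiv track=rewrite | github.com/kevin-rn/Network-Security | Crypto/el_gamal.py | elGamalEncrypt
-- ===== SOURCE A (Python) =====
-- def elGamalEncrypt(h, g, n, r, t):
--     # Calculate c1
--     c1 = pow(g, r, n)
--     power = pow(h, r)
--
--     # Convert every character of plain text t to binary format
--     message = []
--     for character in t:
--         binary_format = format(ord(character), 'b')
--         diff = 8 - len(binary_format)
--         binary_format = ('0' * diff) + binary_format
--         message.append(binary_format)
--
--     # Convert message to decimal format
--     decimal_message = int("".join(message), 2)
--     c2 = (decimal_message * power) % n
--
--     return c1, c2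
-- ===== SOURCE B (Python) =====
-- def elGamalEncrypt(h, g, n, r, t):
--     # One shot: the 8-bit-per-character message is exactly the big-endian
--     # integer of the latin-1 bytes of t, so build it with int.from_bytes
--     # instead of joining padded bit-strings and re-parsing with int(..., 2).
--     # Reduce h^r modulo n (three-argument pow) instead of computing the full
--     # power h**r and taking the remainder of the huge product at the end.
--     decimal_message = int.from_bytes(t.encode('latin-1'), 'big')
--     c1 = pow(g, r, n)
--     c2 = (decimal_message % n) * pow(h, r, n) % n
--     return c1, c2
-- ===== Notes on version B (the rewrite author's own statement) =====
-- stated objective: faster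
-- what changed: B builds the 8-bit-per-character message in one shot as int.from_bytes of the latin-1 bytes of t instead of joining padded bit-strings and re-parsing with int(...,2), and reduces h^r modulo n with three-argument pow instead of computing the full power h**r before the final % n.
-- outside the precondition, e.g. on elGamalEncrypt(2, 3, 5, -1, 'A'): A returns (2, 2.5), B returns (2, 0); on elGamalEncrypt(2, 3, 6, -1, 'A'): A raises ValueError, B raises ValueError; on elGamalEncrypt(2, 3, 5, 4, ''): A raises ValueError, B returns (1, 0)
import Mathlib
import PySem

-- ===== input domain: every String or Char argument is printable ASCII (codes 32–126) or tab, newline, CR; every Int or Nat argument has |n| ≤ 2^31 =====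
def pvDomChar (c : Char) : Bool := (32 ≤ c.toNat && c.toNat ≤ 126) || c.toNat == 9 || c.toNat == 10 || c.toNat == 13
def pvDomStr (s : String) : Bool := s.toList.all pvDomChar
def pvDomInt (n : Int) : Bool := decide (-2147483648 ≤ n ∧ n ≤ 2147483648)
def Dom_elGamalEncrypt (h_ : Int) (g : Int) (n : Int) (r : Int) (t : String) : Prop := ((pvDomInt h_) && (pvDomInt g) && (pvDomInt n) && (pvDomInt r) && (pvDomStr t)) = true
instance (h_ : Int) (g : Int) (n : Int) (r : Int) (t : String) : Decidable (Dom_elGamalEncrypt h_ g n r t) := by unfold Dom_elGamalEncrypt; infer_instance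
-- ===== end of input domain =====

-- B folds the characters directly into one running integer and uses modular exponentiation
-- pow(h, r, n) instead of A's list of padded bit-strings joined and re-parsed by int(..., 2)
-- and A's full power h**r (objective: faster).

-- ===== PORT A =====
-- format(ord(character), 'b') followed by the '0' * (8 - len) padding of A's loop body
def pvBinFormat (c : Char) : List Char :=
  let binary_format := PySem.Int.toBinChars (c.toNat : Int)
  List.replicate (8 - binary_format.length) '0' ++ binary_format

def elGamalEncrypt (h_ : Int) (g : Int) (n : Int) (r : Int) (t : String) : Int × Int :=
  let c1 := PySem.Int.powMod g r.toNat n      -- pow(g, r, n); r ≥ 0 by Pre_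
  let power := h_ ^ r.toNat                   -- pow(h, r)
  let message := t.toList.map pvBinFormat
  -- int("".join(message), 2): the join via PySem.Chars.join, the base-2 conversion ported by
  -- hand as the left-to-right digit fold; exact here because the joined string is a sequence
  -- of '0'/'1' blocks (int's whitespace/sign/underscore cases never occur), and the empty
  -- string, on which int('', 2) raises ValueError, is excluded by Pre_.
  let decimal_message :=
    (PySem.Chars.join [] message).foldl (fun a c => a * 2 + ((c.toNat : Int) - 48)) 0
  let c2 := PySem.Int.mod (decimal_message * power) n
  (c1, c2)

-- ===== PORT B =====
def elGamalEncrypt_alt (h_ : Int) (g : Int) (n : Int) (r : Int) (t : String) : Int × Int :=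
  -- int.from_bytes(t.encode('latin-1'), 'big'): hand-ported as the big-endian base-256 fold
  -- over the characters, which is exact for characters below 256 (all of Dom)
  let decimal_message := t.toList.foldl (fun a c => a * 256 + (c.toNat : Int)) 0
  let c1 := PySem.Int.powMod g r.toNat n
  let c2 := PySem.Int.mod (PySem.Int.mod decimal_message n * PySem.Int.powMod h_ r.toNat n) n
  (c1, c2)

-- ===== PRECONDITION & SPEC =====
-- Pre_ excludes exactly the inputs where A does not return an int pair: r < 0 (pow(h, r) is a
-- float, so c2 is a float — or pow(g, r, n) raises ValueError when g is not invertible mod n),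
-- n = 0 (pow/% raise), and empty t (int('', 2) raises ValueError; B would return (pow(g,r,n), 0) there).
def Pre_elGamalEncrypt (h_ : Int) (g : Int) (n : Int) (r : Int) (t : String) : Prop :=
  0 ≤ r ∧ n ≠ 0 ∧ t ≠ ""
instance (h_ : Int) (g : Int) (n : Int) (r : Int) (t : String) : Decidable (Pre_elGamalEncrypt h_ g n r t) := by unfold Pre_elGamalEncrypt; infer_instance
def pvWitness_elGamalEncrypt : Int × Int × Int × Int × String := (2, 3, 5, 4, "A")

def Spec_elGamalEncrypt (h_ : Int) (g : Int) (n : Int) (r : Int) (t : String) (out : Int × Int) : Prop := out = elGamalEncrypt_alt h_ g n r t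
instance (h_ : Int) (g : Int) (n : Int) (r : Int) (t : String) (out : Int × Int) : Decidable (Spec_elGamalEncrypt h_ g n r t out) := by unfold Spec_elGamalEncrypt; infer_instance

-- ===== CLAIM (what is proved, stated in full; the proofs are below) =====
def Claim_equal_elGamalEncrypt : Prop := ∀ (h_ : Int) (g : Int) (n : Int) (r : Int) (t : String), Dom_elGamalEncrypt h_ g n r t → Pre_elGamalEncrypt h_ g n r t → Spec_elGamalEncrypt h_ g n r t (elGamalEncrypt h_ g n r t)
-- ===== LEMMAS AND PROOFS =====

-- the bit-digit fold with accumulator a, pulled apart from a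
theorem pvParse_shift (cs : List Char) (a : Int) :
    cs.foldl (fun a c => a * 2 + ((c.toNat : Int) - 48)) a
      = a * 2 ^ cs.length + cs.foldl (fun a c => a * 2 + ((c.toNat : Int) - 48)) 0 := by
  induction cs generalizing a with
  | nil => simp
  | cons c cs ih =>
    simp only [List.foldl_cons, List.length_cons]
    rw [ih, ih (0 * 2 + ((c.toNat : Int) - 48))]
    ring

-- pvBinFormat as a function of the character code (definitionally)
def pvBinOf (m : Nat) : List Char :=
  let binary_format := PySem.Int.toBinChars (m : Int)
  List.replicate (8 - binary_format.length) '0' ++ binary_format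

theorem pvBinFormat_eq (c : Char) : pvBinFormat c = pvBinOf c.toNat := rfl

set_option maxRecDepth 4096 in
theorem pvBinOf_spec : ∀ m : Nat, m < 256 →
    (pvBinOf m).length = 8 ∧
      (pvBinOf m).foldl (fun a c => a * 2 + ((c.toNat : Int) - 48)) 0 = (m : Int) := by
  decide

-- the block fold: parsing one padded 8-bit block from accumulator a appends 8 bits of value m
theorem pvBlock_fold (a : Int) (c : Char) (hc : c.toNat < 256) :
    (pvBinFormat c).foldl (fun a c => a * 2 + ((c.toNat : Int) - 48)) a
      = a * 256 + (c.toNat : Int) := by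
  obtain ⟨hlen, hval⟩ := pvBinOf_spec c.toNat hc
  rw [pvBinFormat_eq, pvParse_shift, hlen, hval]
  norm_num

-- "".join(blocks) is the flattening of the blocks
theorem pvJoin_nil (xss : List (List Char)) : PySem.Chars.join [] xss = xss.flatten := by
  induction xss with
  | nil => rfl
  | cons xs xss ih =>
    cases xss with
    | nil => simp [PySem.Chars.join, List.intercalate]
    | cons ys yss =>
      simp only [PySem.Chars.join] at *
      rw [show List.intercalate ([] : List Char) (xs :: ys :: yss)
            = xs ++ [] ++ List.intercalate [] (ys :: yss) from by
          simp [List.intercalate, List.intersperse]]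
      simp_all

-- A's decimal_message equals B's running fold, for any accumulator
theorem pvMessage_eq (cs : List Char) (a : Int) (h : ∀ c ∈ cs, c.toNat < 256) :
    ((cs.map pvBinFormat).flatten).foldl (fun a c => a * 2 + ((c.toNat : Int) - 48)) a
      = cs.foldl (fun a c => a * 256 + (c.toNat : Int)) a := by
  induction cs generalizing a with
  | nil => rfl
  | cons c cs ih =>
    simp only [List.map_cons, List.flatten_cons, List.foldl_append, List.foldl_cons]
    rw [pvBlock_fold a c (h c (by simp)), ih _ (fun d hd => h d (by simp [hd]))]

-- Python's floored % is multiplicative modulo n (any n ≠ 0)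
theorem pvMod_mul (x y n : Int) (hn : n ≠ 0) :
    PySem.Int.mod (x * y) n = PySem.Int.mod (PySem.Int.mod x n * PySem.Int.mod y n) n := by
  have hx := PySem.Int.floordiv_mul_add_mod x n
  have hy := PySem.Int.floordiv_mul_add_mod y n
  have h1 := PySem.Int.floordiv_mul_add_mod (x * y) n
  have h2 := PySem.Int.floordiv_mul_add_mod (PySem.Int.mod x n * PySem.Int.mod y n) n
  set a1 := PySem.Int.floordiv x n
  set a2 := PySem.Int.floordiv y n
  set D1 := PySem.Int.floordiv (x * y) n
  set D2 := PySem.Int.floordiv (PySem.Int.mod x n * PySem.Int.mod y n) n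
  set m1 := PySem.Int.mod (x * y) n
  set m2 := PySem.Int.mod (PySem.Int.mod x n * PySem.Int.mod y n) n
  have hdiff : m1 - m2 = n * (a1 * y + a2 * x - a1 * a2 * n - D1 + D2) := by
    have emx : PySem.Int.mod x n = x - a1 * n := by linarith
    have emy : PySem.Int.mod y n = y - a2 * n := by linarith
    have e1 : m1 = x * y - D1 * n := by linarith
    have e2 : m2 = PySem.Int.mod x n * PySem.Int.mod y n - D2 * n := by linarith
    rw [e1, e2, emx, emy]; ring
  set k := a1 * y + a2 * x - a1 * a2 * n - D1 + D2
  have hk : k = 0 := by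
    rcases lt_or_gt_of_ne hn with hneg | hpos
    · have b1 := PySem.Int.mod_neg_bounds (x * y) hneg
      have b2 := PySem.Int.mod_neg_bounds (PySem.Int.mod x n * PySem.Int.mod y n) hneg
      rcases lt_trichotomy k 0 with h | h | h
      · nlinarith [mul_le_mul_of_nonpos_left (show k ≤ -1 by omega) (le_of_lt hneg)]
      · exact h
      · nlinarith [mul_le_mul_of_nonpos_left (show (1 : Int) ≤ k by omega) (le_of_lt hneg)]
    · have b1l := PySem.Int.mod_nonneg (x * y) hpos
      have b1r := PySem.Int.mod_lt (x * y) hpos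
      have b2l := PySem.Int.mod_nonneg (PySem.Int.mod x n * PySem.Int.mod y n) hpos
      have b2r := PySem.Int.mod_lt (PySem.Int.mod x n * PySem.Int.mod y n) hpos
      rcases lt_trichotomy k 0 with h | h | h
      · nlinarith [mul_le_mul_of_nonneg_left (show k ≤ -1 by omega) (le_of_lt hpos)]
      · exact h
      · nlinarith [mul_le_mul_of_nonneg_left (show (1 : Int) ≤ k by omega) (le_of_lt hpos)]
  have hz : m1 - m2 = 0 := by rw [hdiff, hk, mul_zero]
  linarith

theorem pvCharsLt_of_domStr {t : String} (h : pvDomStr t = true) : ∀ c ∈ t.toList, c.toNat < 256 := by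
  intro c hc
  have := (List.all_eq_true.mp h) c hc
  simp only [pvDomChar, Bool.or_eq_true, Bool.and_eq_true, decide_eq_true_eq, beq_iff_eq] at this
  omega

-- ===== VERDICT (by name: the statement is the Claim_ definition above) =====
theorem elGamalEncrypt_spec : Claim_equal_elGamalEncrypt := by
  intro h_ g n r t hDom hPre
  obtain ⟨hr, hn, ht⟩ := hPre
  unfold Spec_elGamalEncrypt elGamalEncrypt elGamalEncrypt_alt
  simp only []
  have hchars : ∀ c ∈ t.toList, c.toNat < 256 := by
    apply pvCharsLt_of_domStr
    unfold Dom_elGamalEncrypt at hDom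
    simp only [Bool.and_eq_true] at hDom
    exact hDom.2
  rw [pvJoin_nil, pvMessage_eq t.toList 0 hchars]
  rw [pvMod_mul _ _ _ hn]
  rfl
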